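-- pv_equiv track=rewrite | github.com/cvmullor/reference | xmfa_complement.py | create_gap_index
-- ===== SOURCE A (Python) =====
-- def create_gap_index(refseq, fastaseq):
-- 	gapindex = []
-- 	index = 0
-- 	start = 0
-- 	length = 0
-- 	started = False
-- 	for position in range(len(refseq)):
-- 		if not started and refseq[position] == "-":
-- 			start = index
-- 			length = 1
-- 			started = True
-- 		elif started and refseq[position] == "-":
-- 			length = length + 1
-- 		elif started and refseq[position] != "-":
-- 			gapindex.append([index, length])
-- 			index = index + 1
-- 			length = 0
-- 			started = False
-- 		elif not started and refseq[position] != "-":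
-- 			index = index + 1
-- 	if started:
-- 		gapindex.append([index, length])
-- 	gappedseq = insert_gaps(gapindex, fastaseq)
-- 	if len(gappedseq) < len(refseq):
-- 		complete_len = len(refseq) - len(gappedseq)
-- 		gappedseq = gappedseq + "-" * complete_len
-- 	return gappedseq
--
-- def insert_gaps(gapindex, seq):
-- 	shift = 0
-- 	for gaps in gapindex:
-- 		seq = seq[:(gaps[0] + shift)] + "-" * gaps[1] + seq[(gaps[0] + shift):]
-- 		shift = shift + gaps[1]
-- 	return seq
-- ===== SOURCE B (Python) =====
-- def create_gap_index(refseq, fastaseq):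
--     # interleave fastaseq characters with the gaps of refseq in one direct pass
--     out = []
--     j = 0
--     for c in refseq:
--         if c == "-":
--             out.append("-")
--         else:
--             out.append(fastaseq[j:j+1])
--             j += 1
--     out.append(fastaseq[j:])
--     gappedseq = "".join(out)
--     if len(gappedseq) < len(refseq):
--         gappedseq = gappedseq + "-" * (len(refseq) - len(gappedseq))
--     return gappedseq
-- ===== Notes on version B (the rewrite author's own statement) =====
-- stated objective: simpler
-- what changed: Replaces the run-length gap-index table and the slice-and-splice insert_gaps helper with a single direct interleaving pass over refseq carrying a pointer into fastaseq.
import Mathlib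
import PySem

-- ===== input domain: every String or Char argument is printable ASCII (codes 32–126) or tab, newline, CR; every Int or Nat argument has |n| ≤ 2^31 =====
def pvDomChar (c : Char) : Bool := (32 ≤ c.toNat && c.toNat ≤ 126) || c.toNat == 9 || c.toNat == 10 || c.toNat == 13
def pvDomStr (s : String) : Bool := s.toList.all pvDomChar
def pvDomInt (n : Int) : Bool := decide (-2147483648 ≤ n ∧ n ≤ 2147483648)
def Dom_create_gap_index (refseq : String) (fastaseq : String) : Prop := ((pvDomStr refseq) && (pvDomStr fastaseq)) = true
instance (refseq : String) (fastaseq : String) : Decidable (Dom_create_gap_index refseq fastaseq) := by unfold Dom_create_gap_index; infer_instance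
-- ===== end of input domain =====

-- B replaces A's run-length gap-index table plus its slice-and-splice insert_gaps helper
-- with a single direct interleaving pass over refseq carrying a pointer into fastaseq (objective: simpler).

-- ===== PORT A =====
-- loop state of A's for-loop: (gapindex, index, start, length, started)
structure AGapSt where
  gi : List (Int × Int)
  index : Int
  start : Int
  length : Int
  started : Bool
deriving Repr

-- one iteration of A's for-loop body (c = refseq[position]); branches in A's order
def aGapStep (st : AGapSt) (c : Char) : AGapSt :=
  if !st.started && c = '-' then { st with start := st.index, length := 1, started := true }
  else if st.started && c = '-' then { st with length := st.length + 1 }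
  else if st.started && c ≠ '-' then
    { st with gi := st.gi ++ [(st.index, st.length)], index := st.index + 1, length := 0, started := false }
  else { st with index := st.index + 1 }

-- A's helper insert_gaps: its for-loop over gapindex, carrying (seq, shift)
def insertGapsC : List (Int × Int) → List Char → Int → List Char
  | [], s, _ => s
  | (i, l) :: gs, s, shift =>
      insertGapsC gs
        (PySem.List.slice s none (some (i + shift)) ++ List.replicate l.toNat '-' ++
          PySem.List.slice s (some (i + shift)) none) (shift + l)

-- 'for position in range(len(refseq))' reads refseq[position] in order: folded over the characters (exact)
def create_gap_index (refseq : String) (fastaseq : String) : String :=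
  let r := refseq.toList
  let st := r.foldl aGapStep ⟨[], 0, 0, 0, false⟩
  let gapindex := if st.started then st.gi ++ [(st.index, st.length)] else st.gi
  let gappedseq := insertGapsC gapindex fastaseq.toList 0
  let gappedseq :=
    if gappedseq.length < r.length then gappedseq ++ List.replicate (r.length - gappedseq.length) '-'
    else gappedseq
  String.ofList gappedseq

-- ===== PORT B =====
-- one iteration of B's for-loop body: state (out, j)
def bGapStep (f : List Char) (st : List (List Char) × Int) (c : Char) : List (List Char) × Int :=
  if c = '-' then (st.1 ++ [['-']], st.2)
  else (st.1 ++ [PySem.List.slice f (some st.2) (some (st.2 + 1))], st.2 + 1)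

def create_gap_index_alt (refseq : String) (fastaseq : String) : String :=
  let f := fastaseq.toList
  let st := refseq.toList.foldl (bGapStep f) ([], 0)
  let out := st.1 ++ [PySem.List.slice f (some st.2) none]
  let gappedseq := out.flatten
  let gappedseq :=
    if gappedseq.length < refseq.toList.length then
      gappedseq ++ List.replicate (refseq.toList.length - gappedseq.length) '-'
    else gappedseq
  String.ofList gappedseq

-- ===== PRECONDITION & SPEC =====
def Spec_create_gap_index (refseq : String) (fastaseq : String) (out : String) : Prop := out = create_gap_index_alt refseq fastaseq
instance (refseq : String) (fastaseq : String) (out : String) : Decidable (Spec_create_gap_index refseq fastaseq out) := by unfold Spec_create_gap_index; infer_instance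

-- ===== CLAIM (what is proved, stated in full; the proofs are below) =====
def Claim_equal_create_gap_index : Prop := ∀ (refseq : String) (fastaseq : String), Dom_create_gap_index refseq fastaseq → Spec_create_gap_index refseq fastaseq (create_gap_index refseq fastaseq)

-- ===== LEMMAS AND PROOFS =====

-- the interleaving both programs compute (before padding)
def mixGap : List Char → List Char → List Char
  | [], f => f
  | c :: r, [] => if c = '-' then '-' :: mixGap r [] else mixGap r []
  | c :: r, x :: f' => if c = '-' then '-' :: mixGap r (x :: f') else x :: mixGap r f'

lemma mixGap_nil (f : List Char) : mixGap [] f = f := by simp [mixGap]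

lemma mixGap_dash (r f : List Char) : mixGap ('-' :: r) f = '-' :: mixGap r f := by
  cases f <;> simp [mixGap]

lemma mixGap_other_nil (r : List Char) {c : Char} (hc : c ≠ '-') : mixGap (c :: r) [] = mixGap r [] := by
  simp [mixGap, hc]

lemma mixGap_other_cons (r : List Char) {c : Char} (hc : c ≠ '-') (x : Char) (f' : List Char) :
    mixGap (c :: r) (x :: f') = x :: mixGap r f' := by
  simp [mixGap, hc]

-- the gap index A's loop produces, normalised to index origin 0 (gapRuns1 L = inside a gap run of length L so far)
mutual
def gapRuns0 : List Char → List (Int × Int)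
  | [] => []
  | c :: r => if c = '-' then gapRuns1 1 r else (gapRuns0 r).map (fun p => (p.1 + 1, p.2))
def gapRuns1 (L : Nat) : List Char → List (Int × Int)
  | [] => [(0, (L : Int))]
  | c :: r => if c = '-' then gapRuns1 (L + 1) r
      else (0, (L : Int)) :: (gapRuns0 r).map (fun p => (p.1 + 1, p.2))
end

def shiftGI (n : Int) (l : List (Int × Int)) : List (Int × Int) := l.map (fun p => (p.1 + n, p.2))

lemma shiftGI_zero (l : List (Int × Int)) : shiftGI 0 l = l := by simp [shiftGI]

lemma shiftGI_cons (n : Int) (p : Int × Int) (l : List (Int × Int)) :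
    shiftGI n (p :: l) = (p.1 + n, p.2) :: shiftGI n l := rfl

lemma shiftGI_map_one (idx : Int) (l : List (Int × Int)) :
    shiftGI idx (l.map (fun p => (p.1 + 1, p.2))) = shiftGI (idx + 1) l := by
  simp only [shiftGI, List.map_map]
  apply List.map_congr_left
  intro p _
  simp only [Function.comp_apply]
  have : p.1 + 1 + idx = p.1 + (idx + 1) := by ring
  rw [this]

-- the four branches of A's loop body
lemma aGapStep_f_dash (g : List (Int × Int)) (idx s0 l : Int) :
    aGapStep ⟨g, idx, s0, l, false⟩ '-' = ⟨g, idx, idx, 1, true⟩ := by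
  simp [aGapStep]

lemma aGapStep_f_other (g : List (Int × Int)) (idx s0 l : Int) {c : Char} (hc : c ≠ '-') :
    aGapStep ⟨g, idx, s0, l, false⟩ c = ⟨g, idx + 1, s0, l, false⟩ := by
  simp [aGapStep, hc]

lemma aGapStep_t_dash (g : List (Int × Int)) (idx s0 l : Int) :
    aGapStep ⟨g, idx, s0, l, true⟩ '-' = ⟨g, idx, s0, l + 1, true⟩ := by
  simp [aGapStep]

lemma aGapStep_t_other (g : List (Int × Int)) (idx s0 l : Int) {c : Char} (hc : c ≠ '-') :
    aGapStep ⟨g, idx, s0, l, true⟩ c = ⟨g ++ [(idx, l)], idx + 1, s0, 0, false⟩ := by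
  simp [aGapStep, hc]

def finishGI (st : AGapSt) : List (Int × Int) :=
  if st.started then st.gi ++ [(st.index, st.length)] else st.gi

-- characterisation of A's loop, simultaneously for the not-started and started states
lemma aLoop_char (r : List Char) :
    (∀ (g : List (Int × Int)) (idx s0 : Int),
        finishGI (r.foldl aGapStep ⟨g, idx, s0, 0, false⟩) = g ++ shiftGI idx (gapRuns0 r))
    ∧ (∀ (g : List (Int × Int)) (idx s0 : Int) (L : Nat),
        finishGI (r.foldl aGapStep ⟨g, idx, s0, (L : Int), true⟩) = g ++ shiftGI idx (gapRuns1 L r)) := by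
  induction r with
  | nil =>
      constructor
      · intro g idx s0; simp [finishGI, gapRuns0, shiftGI]
      · intro g idx s0 L; simp [finishGI, gapRuns1, shiftGI]
  | cons c r ih =>
      constructor
      · intro g idx s0
        by_cases hc : c = '-'
        · subst hc
          rw [List.foldl_cons, aGapStep_f_dash]
          simp only [gapRuns0, if_pos trivial]
          simpa using ih.2 g idx idx 1
        · rw [List.foldl_cons, aGapStep_f_other g idx s0 0 hc]
          simp only [gapRuns0, if_neg hc]
          rw [ih.1 g (idx + 1) s0, shiftGI_map_one]
      · intro g idx s0 L
        by_cases hc : c = '-'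
        · subst hc
          rw [List.foldl_cons, aGapStep_t_dash]
          simp only [gapRuns1, if_pos trivial]
          have h1 : ((L : Int) + 1) = ((L + 1 : Nat) : Int) := by push_cast; ring
          rw [h1, ih.2 g idx s0 (L + 1)]
        · rw [List.foldl_cons, aGapStep_t_other g idx s0 _ hc]
          simp only [gapRuns1, if_neg hc]
          rw [ih.1 (g ++ [(idx, (L : Int))]) (idx + 1) s0, shiftGI_cons, shiftGI_map_one]
          simp

lemma gapRuns_nonneg (r : List Char) :
    (∀ p ∈ gapRuns0 r, 0 ≤ p.1 ∧ 0 ≤ p.2)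
    ∧ (∀ (L : Nat), ∀ p ∈ gapRuns1 L r, 0 ≤ p.1 ∧ 0 ≤ p.2) := by
  induction r with
  | nil =>
      refine ⟨by simp [gapRuns0], ?_⟩
      intro L p hp
      rw [gapRuns1] at hp
      simp only [List.mem_singleton] at hp
      subst hp; simp
  | cons c r ih =>
      constructor
      · intro p hp
        rw [gapRuns0] at hp
        by_cases hc : c = '-'
        · rw [if_pos hc] at hp; exact ih.2 1 p hp
        · rw [if_neg hc] at hp
          obtain ⟨q, hq, rfl⟩ := List.mem_map.1 hp
          have := ih.1 q hq
          exact ⟨by omega, this.2⟩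
      · intro L p hp
        rw [gapRuns1] at hp
        by_cases hc : c = '-'
        · rw [if_pos hc] at hp; exact ih.2 (L + 1) p hp
        · rw [if_neg hc] at hp
          rcases List.mem_cons.1 hp with rfl | hp'
          · simp
          · obtain ⟨q, hq, rfl⟩ := List.mem_map.1 hp'
            have := ih.1 q hq
            exact ⟨by omega, this.2⟩

-- shifting every gap position by one = raising the running shift by one
lemma insertGapsC_shift_one (gs : List (Int × Int)) :
    ∀ (f : List Char) (s : Int),
      insertGapsC (gs.map (fun p => (p.1 + 1, p.2))) f s = insertGapsC gs f (s + 1) := by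
  induction gs with
  | nil => intro f s; simp [insertGapsC]
  | cons p gs ih =>
      intro f s
      obtain ⟨i, l⟩ := p
      simp only [List.map_cons, insertGapsC]
      rw [show i + 1 + s = i + (s + 1) by ring, show s + 1 + l = s + l + 1 by ring]
      exact ih _ _

-- a prefix the running shift has already passed is untouched
lemma insertGapsC_prefix (gs : List (Int × Int)) :
    ∀ (pre f : List Char) (t : Int), 0 ≤ t → (∀ p ∈ gs, 0 ≤ p.1 ∧ 0 ≤ p.2) →
      insertGapsC gs (pre ++ f) (t + pre.length) = pre ++ insertGapsC gs f t := by
  induction gs with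
  | nil => intro pre f t _ _; simp [insertGapsC]
  | cons p gs ih =>
      intro pre f t ht hnn
      obtain ⟨i, l⟩ := p
      have hi : 0 ≤ i := (hnn (i, l) (by simp)).1
      have hl : 0 ≤ l := (hnn (i, l) (by simp)).2
      simp only [insertGapsC]
      have hpos : (0 : Int) ≤ i + t := by omega
      have hpos' : (0 : Int) ≤ i + (t + pre.length) := by positivity
      rw [PySem.List.slice_to _ hpos', PySem.List.slice_from _ hpos',
          PySem.List.slice_to _ hpos, PySem.List.slice_from _ hpos]
      have htn : (i + (t + (pre.length : Int))).toNat = pre.length + (i + t).toNat := by omega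
      rw [htn, List.take_append, List.drop_append]
      rw [List.take_of_length_le (by omega), List.drop_eq_nil_of_le (by omega)]
      simp only [Nat.add_sub_cancel_left, List.nil_append, List.append_assoc]
      rw [show t + (pre.length : Int) + l = (t + l) + pre.length by ring]
      have := ih pre (List.take (i + t).toNat f ++ (List.replicate l.toNat '-' ++ List.drop (i + t).toNat f))
        (t + l) (by omega) (fun q hq => hnn q (List.mem_cons_of_mem _ hq))
      rw [this]

-- inserting into the empty sequence just writes the dashes
lemma insertGapsC_nil_seq (gs : List (Int × Int)) :
    ∀ (s : Int), 0 ≤ s → (∀ p ∈ gs, 0 ≤ p.1 ∧ 0 ≤ p.2) →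
      insertGapsC gs [] s = List.replicate (gs.map (fun p => p.2.toNat)).sum '-' := by
  induction gs with
  | nil => intro s _ _; simp [insertGapsC]
  | cons p gs ih =>
      intro s hs hnn
      obtain ⟨i, l⟩ := p
      have hi : 0 ≤ i := (hnn (i, l) (by simp)).1
      have hl : 0 ≤ l := (hnn (i, l) (by simp)).2
      simp only [insertGapsC]
      have hpos : (0 : Int) ≤ i + s := by omega
      rw [PySem.List.slice_to _ hpos, PySem.List.slice_from _ hpos]
      simp only [List.take_nil, List.drop_nil, List.nil_append, List.append_nil]
      rw [show List.replicate l.toNat '-' = List.replicate l.toNat '-' ++ ([] : List Char) by simp,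
          show s + l = s + ((List.replicate l.toNat '-' : List Char).length : Int) by simp; omega]
      rw [insertGapsC_prefix gs _ [] s hs (fun q hq => hnn q (List.mem_cons_of_mem _ hq))]
      rw [ih s hs (fun q hq => hnn q (List.mem_cons_of_mem _ hq))]
      simp only [List.map_cons, List.sum_cons]
      exact (List.replicate_add _ _ _).symm

-- main bridge: A's splicing of its gap index = the direct interleaving
lemma insertGapsC_mix (r : List Char) :
    (∀ f, insertGapsC (gapRuns0 r) f 0 = mixGap r f)
    ∧ (∀ (L : Nat) f, insertGapsC (gapRuns1 L r) f 0 = List.replicate L '-' ++ mixGap r f) := by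
  induction r with
  | nil =>
      constructor
      · intro f; simp [gapRuns0, insertGapsC, mixGap_nil]
      · intro L f
        rw [gapRuns1, mixGap_nil]
        simp only [insertGapsC]
        rw [PySem.List.slice_to _ (by omega), PySem.List.slice_from _ (by omega)]
        simp
  | cons c r ih =>
      have hshift1 : ∀ f, insertGapsC ((gapRuns0 r).map (fun p => (p.1 + 1, p.2))) f 0
          = insertGapsC (gapRuns0 r) f 1 := by
        intro f
        simpa using insertGapsC_shift_one (gapRuns0 r) f 0
      constructor
      · intro f
        by_cases hc : c = '-'
        · subst hc
          simp only [gapRuns0, if_pos trivial]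
          rw [mixGap_dash, ih.2 1 f]
          simp
        · simp only [gapRuns0, if_neg hc]
          rw [hshift1]
          cases f with
          | nil =>
              rw [mixGap_other_nil r hc]
              rw [insertGapsC_nil_seq (gapRuns0 r) 1 (by omega) (gapRuns_nonneg r).1,
                  ← insertGapsC_nil_seq (gapRuns0 r) 0 (by omega) (gapRuns_nonneg r).1]
              exact ih.1 []
          | cons x f' =>
              rw [mixGap_other_cons r hc]
              have h := insertGapsC_prefix (gapRuns0 r) [x] f' 0 (le_refl 0) (gapRuns_nonneg r).1
              simp only [List.singleton_append, List.length_cons, List.length_nil] at h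
              norm_num at h
              rw [h, ih.1 f']
      · intro L f
        by_cases hc : c = '-'
        · subst hc
          simp only [gapRuns1, if_pos trivial]
          rw [mixGap_dash, ih.2 (L + 1) f, List.replicate_succ']
          simp
        · simp only [gapRuns1, if_neg hc]
          simp only [insertGapsC]
          rw [PySem.List.slice_to _ (by omega), PySem.List.slice_from _ (by omega)]
          simp only [Int.toNat_zero, List.take_zero, List.drop_zero, List.nil_append,
            Int.toNat_natCast, zero_add]
          rw [insertGapsC_shift_one (gapRuns0 r) (List.replicate L '-' ++ f) (L : Int)]
          have hpre := insertGapsC_prefix (gapRuns0 r) (List.replicate L '-') f 1 (by omega)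
            (gapRuns_nonneg r).1
          simp only [List.length_replicate] at hpre
          rw [show ((L : Int) + 1) = 1 + (L : Int) by ring, hpre]
          cases f with
          | nil =>
              rw [mixGap_other_nil r hc]
              rw [insertGapsC_nil_seq (gapRuns0 r) 1 (by omega) (gapRuns_nonneg r).1,
                  ← insertGapsC_nil_seq (gapRuns0 r) 0 (by omega) (gapRuns_nonneg r).1]
              rw [ih.1 []]
          | cons x f' =>
              rw [mixGap_other_cons r hc]
              have h := insertGapsC_prefix (gapRuns0 r) [x] f' 0 (le_refl 0) (gapRuns_nonneg r).1
              simp only [List.singleton_append, List.length_cons, List.length_nil] at h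
              norm_num at h
              rw [h, ih.1 f']

-- B's loop computes the interleaving
lemma bLoop_char (f : List Char) (r : List Char) :
    ∀ (acc : List (List Char)) (j : Nat),
      ((r.foldl (bGapStep f) (acc, ((j : Nat) : Int))).1
          ++ [PySem.List.slice f (some (r.foldl (bGapStep f) (acc, ((j : Nat) : Int))).2) none]).flatten
        = acc.flatten ++ mixGap r (f.drop j) := by
  induction r with
  | nil =>
      intro acc j
      simp [mixGap_nil, PySem.List.slice_from_natCast]
  | cons c r ih =>
      intro acc j
      by_cases hc : c = '-'
      · subst hc
        rw [List.foldl_cons, show bGapStep f (acc, ((j : Nat) : Int)) '-' = (acc ++ [['-']], ((j : Nat) : Int))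
          by simp [bGapStep]]
        rw [ih (acc ++ [['-']]) j, mixGap_dash]
        simp
      · rw [List.foldl_cons, show bGapStep f (acc, ((j : Nat) : Int)) c
            = (acc ++ [PySem.List.slice f (some (j : Int)) (some ((j : Int) + 1))], ((j + 1 : Nat) : Int)) by
          simp [bGapStep, hc]]
        rw [ih _ (j + 1)]
        have hsl : PySem.List.slice f (some (j : Int)) (some ((j : Int) + 1)) = (f.drop j).take 1 := by
          simpa using PySem.List.slice_natCast_add f j 1
        have hdr : f.drop (j + 1) = (f.drop j).drop 1 := by rw [List.drop_drop]
        rw [hsl, hdr]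
        cases hdj : f.drop j with
        | nil => rw [mixGap_other_nil r hc]; simp
        | cons x t => rw [mixGap_other_cons r hc]; simp

-- ===== VERDICT (by name: the statement is the Claim_ definition above) =====
theorem create_gap_index_spec : Claim_equal_create_gap_index := by
  intro refseq fastaseq _
  unfold Spec_create_gap_index create_gap_index create_gap_index_alt
  simp only []
  have hA : (if (refseq.toList.foldl aGapStep ⟨[], 0, 0, 0, false⟩).started then
        (refseq.toList.foldl aGapStep ⟨[], 0, 0, 0, false⟩).gi
          ++ [((refseq.toList.foldl aGapStep ⟨[], 0, 0, 0, false⟩).index,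
              (refseq.toList.foldl aGapStep ⟨[], 0, 0, 0, false⟩).length)]
      else (refseq.toList.foldl aGapStep ⟨[], 0, 0, 0, false⟩).gi) = gapRuns0 refseq.toList := by
    have h := (aLoop_char refseq.toList).1 [] 0 0
    simpa [finishGI, shiftGI_zero] using h
  have hB := bLoop_char fastaseq.toList refseq.toList [] 0
  simp only [Nat.cast_zero, List.drop_zero, List.flatten_nil, List.nil_append] at hB
  rw [hA, (insertGapsC_mix refseq.toList).1 fastaseq.toList, hB]
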